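-- pv_equiv track=rewrite | github.com/Cezari0o/Gerador-Assinaturas-RSA | utility.py | get_vector_form
-- ===== SOURCE A (Python) =====
-- def get_vector_form(matrix, form = "row"):
--     vector = []
--
--     if form == "row":
--         for row in matrix:
--             vector += row
--
--     else:
--         vector = len(matrix) * len(matrix[0]) * [0]
--
--         for idx in range(len(vector)):
--             vector[idx] = matrix[idx % len(matrix)][idx // len(matrix)]
--
--     return vector
-- ===== SOURCE B (Python) =====
-- def get_vector_form(matrix, form = "row"):
--     # choose rows: the matrix itself, or its explicit transpose (column-major order)
--     if form == "row":
--         rows = matrix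
--     else:
--         rows = [[matrix[r][c] for r in range(len(matrix))]
--                 for c in range(len(matrix[0]))]
--     vector = []
--     for row in rows:
--         vector += row
--     return vector
-- ===== Notes on version B (the rewrite author's own statement) =====
-- stated objective: alternative
-- what changed: The column branch no longer preallocates a zero buffer and fills it with an idx%R/idx//R arithmetic formula; B builds the transpose explicitly as rows and both branches share one uniform row-concatenation flatten.
import Mathlib
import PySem

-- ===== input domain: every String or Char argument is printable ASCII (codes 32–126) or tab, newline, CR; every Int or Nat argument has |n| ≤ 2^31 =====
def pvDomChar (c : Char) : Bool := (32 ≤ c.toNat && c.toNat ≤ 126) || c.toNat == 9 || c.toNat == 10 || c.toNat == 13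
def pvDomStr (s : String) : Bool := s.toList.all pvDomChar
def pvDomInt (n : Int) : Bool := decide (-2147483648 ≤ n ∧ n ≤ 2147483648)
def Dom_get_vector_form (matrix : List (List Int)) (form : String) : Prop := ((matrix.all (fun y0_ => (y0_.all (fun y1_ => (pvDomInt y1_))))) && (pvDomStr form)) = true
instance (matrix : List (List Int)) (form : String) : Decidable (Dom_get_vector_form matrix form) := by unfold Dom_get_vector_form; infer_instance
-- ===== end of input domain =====

-- B replaces the preallocated buffer + idx%R / idx//R fill of the column branch by an explicit
-- transpose followed by the same uniform row-concatenation flatten as the row branch (alternative, not faster).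

-- ===== PORT A =====
def get_vector_form (matrix : List (List Int)) (form : String) : List Int :=
  if form == "row" then
    matrix.foldl (fun vector row => vector ++ row) []
  else
    -- vector = len(matrix) * len(matrix[0]) * [0]
    let vector0 : List Int :=
      List.replicate (matrix.length * (PySem.List.pyGetD matrix 0 []).length) 0
    -- for idx in range(len(vector)): vector[idx] = matrix[idx % len(matrix)][idx // len(matrix)]
    (PySem.List.pyRange 0 (vector0.length : Int) 1).foldl
      (fun vector idx =>
        PySem.List.pySetD vector idx
          (PySem.List.pyGetD
            (PySem.List.pyGetD matrix (PySem.Int.mod idx (matrix.length : Int)) [])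
            (PySem.Int.floordiv idx (matrix.length : Int)) 0))
      vector0

-- ===== PORT B =====
def get_vector_form_alt (matrix : List (List Int)) (form : String) : List Int :=
  let rows : List (List Int) :=
    if form == "row" then matrix
    else
      -- [[matrix[r][c] for r in range(len(matrix))] for c in range(len(matrix[0]))]
      (PySem.List.pyRange 0 ((PySem.List.pyGetD matrix 0 []).length : Int) 1).map
        (fun c =>
          (PySem.List.pyRange 0 (matrix.length : Int) 1).map
            (fun r => PySem.List.pyGetD (PySem.List.pyGetD matrix r []) c 0))
  rows.foldl (fun vector row => vector ++ row) []

-- ===== PRECONDITION & SPEC =====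
-- Pre_ excludes exactly the inputs where Python A raises: in the non-"row" branch A evaluates
-- matrix[0] (IndexError on []), idx % len(matrix) (ZeroDivisionError on []) and
-- matrix[r][c] for all c < len(matrix[0]) (IndexError on a row shorter than row 0).
def Pre_get_vector_form (matrix : List (List Int)) (form : String) : Prop :=
  form = "row" ∨ (matrix ≠ [] ∧ ∀ row ∈ matrix, (matrix.headI).length ≤ row.length)
instance (matrix : List (List Int)) (form : String) : Decidable (Pre_get_vector_form matrix form) := by unfold Pre_get_vector_form; infer_instance
def pvWitness_get_vector_form : List (List Int) × String := ([[1, 2], [3, 4]], "col")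
def Spec_get_vector_form (matrix : List (List Int)) (form : String) (out : List Int) : Prop := out = get_vector_form_alt matrix form
instance (matrix : List (List Int)) (form : String) (out : List Int) : Decidable (Spec_get_vector_form matrix form out) := by unfold Spec_get_vector_form; infer_instance

-- ===== CLAIM (what is proved, stated in full; the proofs are below) =====
def Claim_equal_get_vector_form : Prop := ∀ (matrix : List (List Int)) (form : String), Dom_get_vector_form matrix form → Pre_get_vector_form matrix form → Spec_get_vector_form matrix form (get_vector_form matrix form)

-- ===== LEMMAS AND PROOFS =====

-- A's fill loop over List.range: setting index k to g k, for every k, turns the buffer into the map.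
theorem pv_foldl_set_range (g : Nat → Int) :
    ∀ (m : Nat) (v : List Int), m ≤ v.length →
      (List.range m).foldl (fun v k => v.set k (g k)) v = (List.range m).map g ++ v.drop m := by
  intro m
  induction m with
  | zero => intro v _; simp
  | succ m ih =>
    intro v hv
    rw [List.range_succ, List.foldl_append, ih v (by omega)]
    have hm : m < v.length := by omega
    have hdrop : v.drop m = v[m] :: v.drop (m + 1) := List.drop_eq_getElem_cons hm
    simp only [List.foldl_cons, List.foldl_nil]
    rw [List.set_append, if_neg (by simp)]
    simp only [List.length_map, List.length_range, Nat.sub_self]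
    rw [hdrop, List.set_cons_zero]
    simp

-- index arithmetic: reading position k of the row-major enumeration of the transpose
theorem pv_map_range_mul (R C : Nat) (hR : 0 < R) (get : Nat → Nat → Int) :
    (List.range (R * C)).map (fun k => get (k % R) (k / R))
      = ((List.range C).map (fun c => (List.range R).map (fun r => get r c))).flatten := by
  induction C with
  | zero => simp
  | succ C ih =>
    have hsplit : R * (C + 1) = R * C + R := by ring
    rw [hsplit, List.range_add, List.map_append, ih, List.range_succ, List.map_append]
    simp only [List.flatten_append, List.map_map, List.map_cons, List.map_nil,
      List.flatten_cons, List.flatten_nil, List.append_nil]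
    congr 1
    apply List.map_congr_left
    intro r hr
    have hr' : r < R := List.mem_range.mp hr
    simp only [Function.comp_apply]
    congr 1
    · rw [Nat.add_comm, Nat.mul_comm, Nat.add_mul_mod_self_right, Nat.mod_eq_of_lt hr']
    · rw [Nat.add_comm, Nat.mul_comm, Nat.add_mul_div_right _ _ hR, Nat.div_eq_of_lt hr']
      omega

-- the two column branches agree (for any matrix; Pre_ is only needed for Python-exactness)
theorem pv_col_eq (matrix : List (List Int)) (form : String) (h : (form == "row") = false) :
    get_vector_form matrix form = get_vector_form_alt matrix form := by
  unfold get_vector_form get_vector_form_alt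
  rw [h]
  simp only [Bool.false_eq_true, if_false]
  set R : Nat := matrix.length with hRdef
  set C : Nat := (PySem.List.pyGetD matrix 0 []).length with hCdef
  rcases Nat.eq_zero_or_pos R with hR | hR
  · -- empty matrix: both sides are []
    have hm : matrix = [] := List.length_eq_zero_iff.mp hR
    subst hm
    simp [PySem.List.pyGetD]
    exact Or.inl hR
  · have hlen : (List.replicate (R * C) (0 : Int)).length = R * C := by simp
    rw [hlen]
    have hfun : (fun (v : List Int) (idx : Int) =>
        PySem.List.pySetD v idx
          (PySem.List.pyGetD
            (PySem.List.pyGetD matrix (PySem.Int.mod idx (R : Int)) [])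
            (PySem.Int.floordiv idx (R : Int)) 0))
        = fun v idx => PySem.List.pySetD v idx
            (PySem.List.pyGetD
              (PySem.List.pyGetD matrix (PySem.Int.mod idx (R : Int)) [])
              (PySem.Int.floordiv idx (R : Int)) 0) := rfl
    rw [PySem.List.pyRange_zero_natCast (R * C), List.foldl_map]
    have hstep : (fun (v : List Int) (k : Nat) =>
        PySem.List.pySetD v ((k : Nat) : Int)
          (PySem.List.pyGetD
            (PySem.List.pyGetD matrix (PySem.Int.mod ((k : Nat) : Int) (R : Int)) [])
            (PySem.Int.floordiv ((k : Nat) : Int) (R : Int)) 0))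
        = fun v k => v.set k ((matrix.getD (k % R) []).getD (k / R) 0) := by
      funext v k
      rw [PySem.Int.mod_natCast, PySem.Int.floordiv_natCast,
        PySem.List.pyGetD_natCast, PySem.List.pyGetD_natCast, PySem.List.pySetD_natCast]
    rw [hstep, pv_foldl_set_range _ (R * C) _ (by simp),
      pv_map_range_mul R C hR (fun r c => (matrix.getD r []).getD c 0),
      PySem.List.pyRange_zero_natCast C, PySem.List.pyRange_zero_natCast R]
    simp [PySem.List.foldl_append_eq_flatten, List.map_map, Function.comp_def,
      PySem.List.pyGetD_natCast]

-- ===== VERDICT (by name: the statement is the Claim_ definition above) =====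
theorem get_vector_form_spec : Claim_equal_get_vector_form := by
  intro matrix form _ _
  unfold Spec_get_vector_form
  by_cases h : (form == "row") = true
  · unfold get_vector_form get_vector_form_alt
    rw [h]
    simp
  · exact pv_col_eq matrix form (by simpa using h)
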